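-- pv_equiv track=rewrite | github.com/mindshoot/Aoc23 | Day22/solution.py | iterate_grid
-- ===== SOURCE A (Python) =====
-- def iterate_grid(xs, ys):
--     (x0, x1), (y0, y1) = xs, ys
--     if x0 == x1:
--         yl, yh = (y0, y1) if y0 <= y1 else (y1, y0)
--         return ((x0, y) for y in range(yl, yh + 1))
--     if y0 == y1:
--         xl, xh = (x0, x1) if x0 <= x1 else (x1, x0)
--         return ((x, y0) for x in range(xl, xh + 1))
--     assert False, "This should never happen"
-- ===== SOURCE B (Python) =====
-- def iterate_grid(xs, ys):
--     (x0, x1), (y0, y1) = xs, ys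
--     assert x0 == x1 or y0 == y1, "This should never happen"
--     xlo, xhi = sorted((x0, x1))
--     ylo, yhi = sorted((y0, y1))
--     return ((x, y) for x in range(xlo, xhi + 1) for y in range(ylo, yhi + 1))
-- ===== Notes on version B (the rewrite author's own statement) =====
-- stated objective: simpler
-- what changed: Replaces the two explicit axis branches with one eager assert plus a single nested-product generator over the sorted ranges of both axes (the fixed axis collapses to a one-element range), preserving order.
import Mathlib
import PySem

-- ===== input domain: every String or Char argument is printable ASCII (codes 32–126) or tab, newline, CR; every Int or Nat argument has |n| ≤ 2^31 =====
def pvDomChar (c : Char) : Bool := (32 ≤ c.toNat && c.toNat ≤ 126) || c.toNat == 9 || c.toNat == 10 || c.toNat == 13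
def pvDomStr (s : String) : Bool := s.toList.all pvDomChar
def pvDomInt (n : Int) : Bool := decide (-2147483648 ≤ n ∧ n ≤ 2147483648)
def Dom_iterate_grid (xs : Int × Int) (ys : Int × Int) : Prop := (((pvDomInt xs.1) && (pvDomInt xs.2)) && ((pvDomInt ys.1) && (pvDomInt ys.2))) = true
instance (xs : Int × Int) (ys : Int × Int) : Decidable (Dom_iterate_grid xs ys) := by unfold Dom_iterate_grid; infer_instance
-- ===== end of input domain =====

-- B replaces A's two per-axis branches with one assert plus a single nested product
-- over the sorted ranges of both axes (objective: simpler); return-value equivalence on Pre_.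

-- ===== PORT A =====
def iterate_grid (xs : Int × Int) (ys : Int × Int) : List (Int × Int) :=
  let x0 := xs.1; let x1 := xs.2; let y0 := ys.1; let y1 := ys.2
  if x0 = x1 then
    let p := if y0 ≤ y1 then (y0, y1) else (y1, y0)
    (PySem.List.pyRange p.1 (p.2 + 1) 1).map (fun y => (x0, y))
  else if y0 = y1 then
    let q := if x0 ≤ x1 then (x0, x1) else (x1, x0)
    (PySem.List.pyRange q.1 (q.2 + 1) 1).map (fun x => (x, y0))
  else []  -- Python's `assert False` raises here: excluded by Pre_iterate_grid

-- ===== PORT B =====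
def iterate_grid_alt (xs : Int × Int) (ys : Int × Int) : List (Int × Int) :=
  let x0 := xs.1; let x1 := xs.2; let y0 := ys.1; let y1 := ys.2
  -- the assert raises exactly outside Pre_iterate_grid
  let xlo := min x0 x1; let xhi := max x0 x1
  let ylo := min y0 y1; let yhi := max y0 y1
  (PySem.List.pyRange xlo (xhi + 1) 1).flatMap
    (fun x => (PySem.List.pyRange ylo (yhi + 1) 1).map (fun y => (x, y)))

-- ===== PRECONDITION & SPEC =====
-- A raises AssertionError (and B's assert raises too) unless the segment is axis-aligned.
def Pre_iterate_grid (xs : Int × Int) (ys : Int × Int) : Prop := xs.1 = xs.2 ∨ ys.1 = ys.2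
instance (xs : Int × Int) (ys : Int × Int) : Decidable (Pre_iterate_grid xs ys) := by unfold Pre_iterate_grid; infer_instance
def pvWitness_iterate_grid : (Int × Int) × (Int × Int) := ((2, 2), (5, 3))

def Spec_iterate_grid (xs : Int × Int) (ys : Int × Int) (out : List (Int × Int)) : Prop := out = iterate_grid_alt xs ys
instance (xs : Int × Int) (ys : Int × Int) (out : List (Int × Int)) : Decidable (Spec_iterate_grid xs ys out) := by unfold Spec_iterate_grid; infer_instance

-- ===== CLAIM (what is proved, stated in full; the proofs are below) =====
def Claim_equal_iterate_grid : Prop := ∀ (xs : Int × Int) (ys : Int × Int), Dom_iterate_grid xs ys → Pre_iterate_grid xs ys → Spec_iterate_grid xs ys (iterate_grid xs ys)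

-- ===== LEMMAS AND PROOFS =====

theorem pyRange_self_succ (a : Int) : PySem.List.pyRange a (a + 1) 1 = [a] := by
  rw [PySem.List.pyRange_one_cons (by omega)]
  simp [PySem.List.pyRange]

theorem flatMap_pure {α β : Type} (l : List α) (f : α → β) :
    l.flatMap (fun x => [f x]) = l.map f := by
  induction l <;> simp_all

-- ===== VERDICT (by name: the statement is the Claim_ definition above) =====
theorem iterate_grid_spec : Claim_equal_iterate_grid := by
  intro ⟨x0, x1⟩ ⟨y0, y1⟩ _ hpre
  unfold Spec_iterate_grid iterate_grid iterate_grid_alt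
  rcases hpre with hx | hy
  · -- A's first branch: x0 = x1, B's x-range collapses to [x0]
    simp only at hx
    subst hx
    simp only [if_pos rfl]
    have hxr : PySem.List.pyRange (min x0 x0) (max x0 x0 + 1) 1 = [x0] := by
      rw [min_self, max_self]; exact pyRange_self_succ x0
    rw [hxr]
    simp only [List.flatMap_cons, List.flatMap_nil, List.append_nil]
    by_cases h : y0 ≤ y1 <;> simp [h, min_def, max_def]
  · -- A's second branch: y0 = y1, B's y-range collapses to [y0]
    simp only at hy
    subst hy
    by_cases hx : x0 = x1
    · subst hx
      simp only [if_pos rfl]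
      simp [min_self, max_self, pyRange_self_succ]
    · simp only [if_neg hx, if_pos rfl]
      have hyr : PySem.List.pyRange (min y0 y0) (max y0 y0 + 1) 1 = [y0] := by
        rw [min_self, max_self]; exact pyRange_self_succ y0
      rw [hyr]
      simp only [List.map_cons, List.map_nil]
      rw [flatMap_pure]
      by_cases h : x0 ≤ x1 <;> simp [h, min_def, max_def]
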